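-- pv_equiv track=rewrite | github.com/ArnavDalmia/LeetSandbox | leetsandbox/problemFunctions/125validPalindrome.py | validPalindromeFunctionality
-- ===== SOURCE A (Python) =====
-- def validPalindromeFunctionality(s):
--     text = ''.join(x for x in s if x.isalnum())
--     text = text.lower()
--     if len(text) <= 2:
--         if len(text) <= 1:
--             return True
--         if text[0] == text[1]:
--             return True
--         else:
--             return False
--     left = 0
--     right = len(text) - 1
--
--     while left < right:
--         if text[left] != text[right]:
--             return False
--         else:
--             left += 1
--             right -= 1
--
--     return True
-- ===== SOURCE B (Python) =====
-- def validPalindromeFunctionality(s):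
--     # Normalize once, then compare against the reversed copy; no pointers, no branches.
--     t = [c.lower() for c in s if c.isalnum()]
--     return t == t[::-1]
-- ===== Notes on version B (the rewrite author's own statement) =====
-- stated objective: simpler
-- what changed: Replaces A's length-case branching plus two-pointer inward while-loop with a single comprehension building the normalized sequence and one reverse-and-compare expression.
import Mathlib
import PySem

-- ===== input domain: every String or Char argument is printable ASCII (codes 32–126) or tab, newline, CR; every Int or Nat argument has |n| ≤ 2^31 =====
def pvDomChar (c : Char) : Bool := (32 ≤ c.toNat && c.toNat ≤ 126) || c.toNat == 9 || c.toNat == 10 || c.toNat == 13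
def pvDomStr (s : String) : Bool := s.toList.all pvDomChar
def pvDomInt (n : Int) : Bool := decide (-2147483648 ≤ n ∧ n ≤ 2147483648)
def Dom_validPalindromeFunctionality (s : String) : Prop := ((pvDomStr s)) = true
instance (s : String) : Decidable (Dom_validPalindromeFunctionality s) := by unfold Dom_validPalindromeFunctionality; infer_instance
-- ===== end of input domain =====

-- B replaces A's length-case branching + two-pointer inward loop by building the
-- normalized sequence once and comparing it with its reversed copy (simpler; same cost).


-- ===== PORT A =====
-- A's while-loop over (left, right); indices are always in range when called, so
-- getD is exact for Python's text[left] / text[right].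
def pvLoopA (text : List Char) (left right : Nat) : Bool :=
  if left < right then
    if text.getD left ' ' ≠ text.getD right ' ' then false
    else pvLoopA text (left + 1) (right - 1)
  else true
termination_by right - left

def validPalindromeFunctionality (s : String) : Bool :=
  let text := s.toList.filter PySem.Chars.isalnum
  let text := PySem.Chars.lower text
  if text.length ≤ 2 then
    if text.length ≤ 1 then true
    else if text.getD 0 ' ' = text.getD 1 ' ' then true else false
  else
    pvLoopA text 0 (text.length - 1)

-- ===== PORT B =====
def validPalindromeFunctionality_alt (s : String) : Bool :=
  let t := (s.toList.filter PySem.Chars.isalnum).map PySem.Chars.lowerChar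
  t == t.reverse

-- ===== PRECONDITION & SPEC =====
def Spec_validPalindromeFunctionality (s : String) (out : Bool) : Prop := out = validPalindromeFunctionality_alt s
instance (s : String) (out : Bool) : Decidable (Spec_validPalindromeFunctionality s out) := by unfold Spec_validPalindromeFunctionality; infer_instance

-- ===== CLAIM (what is proved, stated in full; the proofs are below) =====
def Claim_equal_validPalindromeFunctionality : Prop := ∀ (s : String), Dom_validPalindromeFunctionality s → Spec_validPalindromeFunctionality s (validPalindromeFunctionality s)

-- ===== LEMMAS AND PROOFS =====

theorem pv_rev_len_le_one (t : List Char) (h : t.length ≤ 1) : t.reverse = t := by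
  match t with
  | [] => rfl
  | [_] => rfl
  | _ :: _ :: _ => simp at h

theorem pv_pal_cons_append (a b : Char) (m : List Char) :
    ((a :: (m ++ [b])) = (a :: (m ++ [b])).reverse) ↔ (a = b ∧ m = m.reverse) := by
  simp only [List.reverse_cons, List.reverse_append, List.reverse_cons, List.reverse_nil,
    List.nil_append, List.cons_append, List.cons.injEq]
  constructor
  · rintro ⟨rfl, h2⟩
    exact ⟨rfl, by simpa using congrArg (List.dropLast) h2⟩
  · rintro ⟨rfl, h2⟩
    exact ⟨rfl, by rw [← h2]⟩

theorem pv_seg_decomp (t : List Char) (l r : Nat) (hlr : l < r) (hr : r < t.length) :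
    (t.drop l).take (r + 1 - l) =
      t.getD l ' ' :: (((t.drop (l + 1)).take (r - 1 + 1 - (l + 1))) ++ [t.getD r ' ']) := by
  have hl : l < t.length := lt_trans hlr hr
  have hdrop : t.drop l = t.getD l ' ' :: t.drop (l + 1) := by
    rw [List.getD_eq_getElem t ' ' hl]
    rw [List.drop_eq_getElem_cons hl]
  have h1 : r + 1 - l = (r - l - 1) + 1 + 1 := by omega
  have h2 : r - 1 + 1 - (l + 1) = r - l - 1 := by omega
  rw [hdrop, h1, h2, List.take_succ_cons, List.take_add_one]
  congr 1
  have : (t.drop (l + 1))[r - l - 1]? = some (t.getD r ' ') := by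
    rw [List.getElem?_drop]
    have : l + 1 + (r - l - 1) = r := by omega
    rw [this, List.getElem?_eq_getElem hr, List.getD_eq_getElem t ' ' hr]
  simp [this]

theorem pv_loop_eq (t : List Char) (l r : Nat) (hr : r < t.length) :
    pvLoopA t l r = ((t.drop l).take (r + 1 - l) == ((t.drop l).take (r + 1 - l)).reverse) := by
  fun_induction pvLoopA t l r with
  | case1 l r hlr hne =>
    -- mismatch: result false
    rw [pv_seg_decomp t l r hlr hr, eq_comm, beq_eq_false_iff_ne]
    rw [Ne, pv_pal_cons_append]
    rintro ⟨h1, _⟩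
    exact hne h1
  | case2 l r hlr hne ih =>
    have hr' : r - 1 < t.length := by omega
    rw [ih hr', pv_seg_decomp t l r hlr hr]
    apply Bool.eq_iff_iff.mpr
    simp only [beq_iff_eq]
    rw [pv_pal_cons_append]
    exact ⟨fun h => ⟨not_not.mp hne, h⟩, And.right⟩
  | case3 l r hlr =>
    have hle : ((t.drop l).take (r + 1 - l)).length ≤ 1 := by
      have := List.length_take_le (r + 1 - l) (t.drop l)
      omega
    rw [pv_rev_len_le_one _ hle]
    exact (beq_iff_eq.mpr rfl).symm

-- ===== VERDICT (by name: the statement is the Claim_ definition above) =====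
theorem validPalindromeFunctionality_spec : Claim_equal_validPalindromeFunctionality := by
  intro s _
  simp only [Spec_validPalindromeFunctionality, validPalindromeFunctionality,
    validPalindromeFunctionality_alt]
  rw [show PySem.Chars.lower (s.toList.filter PySem.Chars.isalnum) =
      (s.toList.filter PySem.Chars.isalnum).map PySem.Chars.lowerChar from rfl]
  set t := (s.toList.filter PySem.Chars.isalnum).map PySem.Chars.lowerChar with ht
  clear_value t
  by_cases h2 : t.length ≤ 2
  · rw [if_pos h2]
    by_cases h1 : t.length ≤ 1
    · rw [if_pos h1]
      exact (beq_iff_eq.mpr (pv_rev_len_le_one t h1).symm).symm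
    · rw [if_neg h1]
      obtain ⟨a, b, rfl⟩ : ∃ a b, t = [a, b] := by
        match t, h1, h2 with
        | [a, b], _, _ => exact ⟨a, b, rfl⟩
        | [], h1, _ => simp at h1
        | [x], h1, _ => simp at h1
        | _ :: _ :: _ :: _, _, h2 => simp at h2
      simp only [List.getD_cons_zero, List.getD_cons_succ]
      by_cases hab : a = b <;> simp [hab]
  · rw [if_neg h2]
    have hlen : t.length - 1 < t.length := by omega
    rw [pv_loop_eq t 0 (t.length - 1) hlen]
    have h3 : t.length - 1 + 1 - 0 = t.length := by omega
    rw [h3]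
    simp
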